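-- pv_equiv track=rewrite | github.com/wyk18703232953/myResearch | codeComplex/data copy/onlyCode/python/np/python_np_0455.py | solve
-- ===== SOURCE A (Python) =====
-- from math import gcd
--
-- def solve(n, x, y):
--     g = gcd(x, y)
--     if gcd(x, y) != 1:
--         return solve(n // g + 1, x // g, y // g) * (n % g) + solve(n // g, x // g, y // g) * (g - n % g)
--     ans = 0
--     for s in [0, 1]:
--         dp = [-n, -n]
--         dp[s] = 0
--         for i in range(x + y):
--             dp = [max(dp[0], dp[1]), dp[0] + (n // (x + y)) + (i * x % (x + y) < n % (x + y))]
--         ans = max(ans, dp[s])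
--     return ans
-- ===== SOURCE B (Python) =====
-- from math import gcd
--
-- def _mm(A, B):
--     # 2x2 matrix product in the (max, +) tropical semiring; None plays -infinity
--     def add(a, b):
--         return None if a is None or b is None else a + b
--     def mx(a, b):
--         if a is None:
--             return b
--         if b is None:
--             return a
--         return max(a, b)
--     return [[mx(add(A[i][0], B[0][j]), add(A[i][1], B[1][j])) for j in (0, 1)]
--             for i in (0, 1)]
--
-- def solve(n, x, y):
--     g = gcd(x, y)
--     if g != 1:
--         return solve(n // g + 1, x // g, y // g) * (n % g) + solve(n // g, x // g, y // g) * (g - n % g)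
--     L = x + y
--     # transfer-matrix formulation of the cyclic DP: state = whether the current
--     # position is taken; Q accumulates the product of per-position matrices,
--     # and the cycle answer is the best finite diagonal entry of Q.
--     Q = [[0, None], [None, 0]]  # (max,+) identity
--     for i in range(L):
--         w = n // L + (i * x % L < n % L)
--         Q = _mm(Q, [[0, w], [0, None]])
--     # Q[0][0] is always finite; Q[1][1] may be -infinity (e.g. L == 1)
--     return Q[0][0] if Q[1][1] is None else max(Q[0][0], Q[1][1])
-- ===== Notes on version B (the rewrite author's own statement) =====
-- stated objective: alternative
-- what changed: The base case is recast as a (max,+) transfer-matrix computation: each cycle position contributes a 2x2 tropical matrix (None = -infinity) indexed by taken/not-taken, one pass multiplies them into Q, and the answer is the best finite diagonal entry of Q; A instead runs the 2-slot dp loop twice with a -n sentinel and reads the seeded slot. The gcd-reduction branch is kept.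
-- outside the precondition, e.g. on solve(-15, 0, 1): A returns 15, B returns 0; on solve(-3, 2, 3): A returns 3, B returns 0; on solve(5, 0, 0): A raises ZeroDivisionError, B raises ZeroDivisionError
import Mathlib
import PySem

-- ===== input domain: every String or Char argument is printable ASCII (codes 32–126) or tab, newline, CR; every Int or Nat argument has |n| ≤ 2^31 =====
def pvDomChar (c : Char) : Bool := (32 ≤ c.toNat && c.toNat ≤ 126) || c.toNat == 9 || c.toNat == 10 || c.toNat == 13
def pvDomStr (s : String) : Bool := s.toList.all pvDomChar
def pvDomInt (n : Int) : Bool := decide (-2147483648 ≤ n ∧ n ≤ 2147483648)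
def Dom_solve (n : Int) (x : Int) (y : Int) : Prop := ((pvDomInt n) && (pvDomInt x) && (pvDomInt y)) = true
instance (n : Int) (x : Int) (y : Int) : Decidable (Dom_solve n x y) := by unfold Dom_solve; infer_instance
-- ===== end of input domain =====

-- B recasts A's sentinel-seeded two-pass cyclic DP as one pass of (max,+) 2x2 transfer-matrix
-- products (Option Int, none = -infinity) read off at the diagonal; same cost, different
-- algorithmic formulation (objective: alternative). Equivalence is about return values.

-- termination helper for both ports (cited in decreasing_by): after dividing by g = gcd ≥ 2 the gcd drops to 1
theorem pv_gcd_fdiv_lt (x y : Int) (h1 : (Int.gcd x y : Int) ≠ 1) (h0 : (Int.gcd x y : Int) ≠ 0) :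
    Int.gcd (PySem.Int.floordiv x (Int.gcd x y)) (PySem.Int.floordiv y (Int.gcd x y)) < Int.gcd x y := by
  have hg : 0 < (Int.gcd x y : Int) := by
    have : (0 : Int) ≤ (Int.gcd x y : Int) := Int.natCast_nonneg _
    omega
  rw [PySem.Int.floordiv_eq_ediv_of_pos hg, PySem.Int.floordiv_eq_ediv_of_pos hg]
  have := Int.gcd_div_gcd_div_gcd (i := x) (j := y) (by exact_mod_cast hg)
  rw [this]
  omega

-- ===== PORT A =====
def solve (n : Int) (x : Int) (y : Int) : Int :=
  if h1 : ((Int.gcd x y : Int) ≠ 1) then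
    -- Python: g = gcd(x, y); if gcd(x, y) != 1: recurse on the reduced instance
    if h0 : ((Int.gcd x y : Int) = 0) then 0  -- Python raises ZeroDivisionError here (x = y = 0); excluded by Pre_solve
    else
      solve (PySem.Int.floordiv n (Int.gcd x y) + 1) (PySem.Int.floordiv x (Int.gcd x y)) (PySem.Int.floordiv y (Int.gcd x y))
          * (PySem.Int.mod n (Int.gcd x y))
        + solve (PySem.Int.floordiv n (Int.gcd x y)) (PySem.Int.floordiv x (Int.gcd x y)) (PySem.Int.floordiv y (Int.gcd x y))
          * ((Int.gcd x y : Int) - PySem.Int.mod n (Int.gcd x y))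
  else
    -- ans = 0; for s in [0, 1]: dp = [-n, -n]; dp[s] = 0; inner loop; ans = max(ans, dp[s])
    ([0, 1] : List Int).foldl (fun ans s =>
      let dp0 : Int × Int := if s = 0 then (0, -n) else (-n, 0)
      let dp := (PySem.List.pyRange 0 (x + y) 1).foldl
        (fun dp i => (max dp.1 dp.2,
          dp.1 + PySem.Int.floordiv n (x + y)
            + (if PySem.Int.mod (i * x) (x + y) < PySem.Int.mod n (x + y) then 1 else 0))) dp0
      max ans (if s = 0 then dp.1 else dp.2)) 0
termination_by (Int.gcd x y)
decreasing_by
  · exact pv_gcd_fdiv_lt x y h1 h0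
  · exact pv_gcd_fdiv_lt x y h1 h0

-- ===== PORT B =====
-- mx / add of Source B's _mm: (max,+) tropical semiring on Option Int, none = -infinity
def omax2 : Option Int → Option Int → Option Int
  | none, b => b
  | some a, none => some a
  | some a, some b => some (max a b)

def oadd2 : Option Int → Option Int → Option Int
  | some a, some b => some (a + b)
  | _, _ => none

-- _mm: 2x2 matrix product in the (max,+) semiring; a matrix is (row0, row1)
def mm (A B : (Option Int × Option Int) × (Option Int × Option Int)) :
    (Option Int × Option Int) × (Option Int × Option Int) :=
  ((omax2 (oadd2 A.1.1 B.1.1) (oadd2 A.1.2 B.2.1),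
    omax2 (oadd2 A.1.1 B.1.2) (oadd2 A.1.2 B.2.2)),
   (omax2 (oadd2 A.2.1 B.1.1) (oadd2 A.2.2 B.2.1),
    omax2 (oadd2 A.2.1 B.1.2) (oadd2 A.2.2 B.2.2)))

def solve_alt (n : Int) (x : Int) (y : Int) : Int :=
  if h1 : ((Int.gcd x y : Int) ≠ 1) then
    if h0 : ((Int.gcd x y : Int) = 0) then 0  -- Python raises ZeroDivisionError here (x = y = 0); excluded by Pre_solve
    else
      solve_alt (PySem.Int.floordiv n (Int.gcd x y) + 1) (PySem.Int.floordiv x (Int.gcd x y)) (PySem.Int.floordiv y (Int.gcd x y))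
          * (PySem.Int.mod n (Int.gcd x y))
        + solve_alt (PySem.Int.floordiv n (Int.gcd x y)) (PySem.Int.floordiv x (Int.gcd x y)) (PySem.Int.floordiv y (Int.gcd x y))
          * ((Int.gcd x y : Int) - PySem.Int.mod n (Int.gcd x y))
  else
    -- Q = identity; for i in range(L): Q = _mm(Q, [[0, w],[0, None]])
    let Q := (PySem.List.pyRange 0 (x + y) 1).foldl
      (fun Q i =>
        let w : Int := PySem.Int.floordiv n (x + y)
          + (if PySem.Int.mod (i * x) (x + y) < PySem.Int.mod n (x + y) then 1 else 0)
        mm Q ((some 0, some w), (some 0, none)))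
      ((some 0, none), (none, some 0))
    -- return Q[0][0] if Q[1][1] is None else max(Q[0][0], Q[1][1]);
    -- Q[0][0] is always finite, so getD's default is never used
    match Q.2.2 with
    | none => Q.1.1.getD 0
    | some b => max (Q.1.1.getD 0) b
termination_by (Int.gcd x y)
decreasing_by
  · exact pv_gcd_fdiv_lt x y h1 h0
  · exact pv_gcd_fdiv_lt x y h1 h0

-- ===== PRECONDITION & SPEC =====
-- Pre_solve restricts to the natural domain n ≥ 0 (n is a count: for n < 0 the -n dp sentinel,
-- meant as -infinity, becomes a positive bonus and A returns sentinel-driven values) and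
-- excludes x = y = 0, where A raises ZeroDivisionError.
def Pre_solve (n : Int) (x : Int) (y : Int) : Prop := 0 ≤ n ∧ ¬(x = 0 ∧ y = 0)
instance (n : Int) (x : Int) (y : Int) : Decidable (Pre_solve n x y) := by unfold Pre_solve; infer_instance
def pvWitness_solve : Int × Int × Int := (5, 2, 3)

def Spec_solve (n : Int) (x : Int) (y : Int) (out : Int) : Prop := out = solve_alt n x y
instance (n : Int) (x : Int) (y : Int) (out : Int) : Decidable (Spec_solve n x y out) := by unfold Spec_solve; infer_instance

-- ===== CLAIM (what is proved, stated in full; the proofs are below) =====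
def Claim_equal_solve : Prop := ∀ (n : Int) (x : Int) (y : Int), Dom_solve n x y → Pre_solve n x y → Spec_solve n x y (solve n x y)

-- ===== LEMMAS AND PROOFS =====

-- the one-step transition of A's inner dp, as a function of the weight
def Fstep (dp : Int × Int) (a : Int) : Int × Int := (max dp.1 dp.2, dp.1 + a)
def F (l : List Int) (dp : Int × Int) : Int × Int := l.foldl Fstep dp

-- the action of one transfer matrix on a row, as a function of the weight
def ostep (r : Option Int × Option Int) (w : Int) : Option Int × Option Int :=
  (omax2 r.1 r.2, oadd2 r.1 (some w))

-- multiplying by the transfer matrix of weight w acts as ostep on each row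
theorem mm_step (Q : (Option Int × Option Int) × (Option Int × Option Int)) (w : Int) :
    mm Q ((some 0, some w), (some 0, none)) = (ostep Q.1 w, ostep Q.2 w) := by
  obtain ⟨⟨a, b⟩, ⟨c, d⟩⟩ := Q
  cases a <;> cases b <;> cases c <;> cases d <;> simp [mm, ostep, omax2, oadd2]

-- hence the whole matrix fold is two independent row folds
theorem fold_mm (l : List Int) (Q : (Option Int × Option Int) × (Option Int × Option Int)) :
    l.foldl (fun Q w => mm Q ((some 0, some w), (some 0, none))) Q
      = (l.foldl ostep Q.1, l.foldl ostep Q.2) := by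
  induction l generalizing Q with
  | nil => rfl
  | cons w l ih => simp only [List.foldl]; rw [mm_step, ih]

-- relation between A's sentinelled dp pair and B's Option row
def RelP (n : Int) (dp : Int × Int) (o : Option Int × Option Int) : Prop :=
  (∀ v, o.1 = some v → dp.1 = v ∧ 0 ≤ v) ∧
  (∀ v, o.2 = some v → dp.2 = v ∧ 0 ≤ v) ∧
  (o.1 = none → dp.1 = -n ∧ o.2 ≠ none) ∧
  (o.2 = none → dp.2 ≤ 0)

theorem RelP_step (n : Int) (dp : Int × Int) (o : Option Int × Option Int) (w : Int)
    (hn : 0 ≤ n) (hw0 : 0 ≤ w) (hwn : w ≤ n) (h : RelP n dp o) :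
    RelP n (Fstep dp w) (ostep o w) := by
  obtain ⟨h1, h2, h3, h4⟩ := h
  obtain ⟨o1, o2⟩ := o
  cases o1 with
  | some v1 =>
    obtain ⟨hd1, hv1⟩ := h1 v1 rfl
    cases o2 with
    | some v2 =>
      obtain ⟨hd2, hv2⟩ := h2 v2 rfl
      refine ⟨?_, ?_, ?_, ?_⟩ <;> simp [Fstep, ostep, omax2, oadd2] <;> omega
    | none =>
      have hd2 := h4 rfl
      refine ⟨?_, ?_, ?_, ?_⟩ <;> simp [Fstep, ostep, omax2, oadd2] <;> omega
  | none =>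
    obtain ⟨hd1, ho2⟩ := h3 rfl
    cases o2 with
    | some v2 =>
      obtain ⟨hd2, hv2⟩ := h2 v2 rfl
      refine ⟨?_, ?_, ?_, ?_⟩ <;> simp [Fstep, ostep, omax2, oadd2] <;> omega
    | none => exact absurd rfl ho2

theorem RelP_fold (n : Int) (l : List Int) (dp : Int × Int) (o : Option Int × Option Int)
    (hn : 0 ≤ n) (hl : ∀ a ∈ l, 0 ≤ a ∧ a ≤ n) (h : RelP n dp o) :
    RelP n (F l dp) (l.foldl ostep o) := by
  induction l generalizing dp o with
  | nil => exact h
  | cons w l ih =>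
    simp only [F, List.foldl] at *
    exact ih (Fstep dp w) (ostep o w)
      (fun a ha => hl a (List.mem_cons_of_mem w ha))
      (RelP_step n dp o w hn (hl w List.mem_cons_self).1 (hl w List.mem_cons_self).2 h)

-- the first row component stays finite once it is finite
theorem fold_fst_some (l : List Int) (o : Option Int × Option Int) (h : o.1 ≠ none) :
    (l.foldl ostep o).1 ≠ none := by
  induction l generalizing o with
  | nil => exact h
  | cons w l ih =>
    simp only [List.foldl]
    refine ih _ ?_
    obtain ⟨o1, o2⟩ := o
    cases o1 with
    | some v1 => cases o2 <;> simp [ostep, omax2]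
    | none => exact absurd rfl h

-- the inline loop body of port A is Fstep applied to the weight function
theorem foldA_eq_F (n L : Int) (x : Int) (l : List Int) (dp0 : Int × Int) :
    l.foldl (fun dp i => (max dp.1 dp.2,
        dp.1 + PySem.Int.floordiv n L
          + (if PySem.Int.mod (i * x) L < PySem.Int.mod n L then 1 else 0))) dp0
      = F (l.map (fun i => PySem.Int.floordiv n L
          + (if PySem.Int.mod (i * x) L < PySem.Int.mod n L then (1 : Int) else 0))) dp0 := by
  induction l generalizing dp0 with
  | nil => rfl
  | cons a l ih =>
    simp only [List.foldl, List.map, F] at *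
    rw [ih]
    congr 1
    simp [Fstep, add_assoc]

-- the inline loop body of port B folds the same weight list through the matrices
theorem foldB_eq (n L : Int) (x : Int) (l : List Int)
    (Q : (Option Int × Option Int) × (Option Int × Option Int)) :
    l.foldl (fun Q i =>
        let w : Int := PySem.Int.floordiv n L
          + (if PySem.Int.mod (i * x) L < PySem.Int.mod n L then 1 else 0)
        mm Q ((some 0, some w), (some 0, none))) Q
      = (l.map (fun i => PySem.Int.floordiv n L
          + (if PySem.Int.mod (i * x) L < PySem.Int.mod n L then (1 : Int) else 0))).foldl
          (fun Q w => mm Q ((some 0, some w), (some 0, none))) Q := by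
  induction l generalizing Q with
  | nil => rfl
  | cons a l ih => simp only [List.foldl, List.map] at *; rw [ih]

-- every weight is between 0 and n
theorem w_bounds (n L : Int) (x : Int) (hn : 0 ≤ n) :
    ∀ a ∈ (PySem.List.pyRange 0 L 1).map (fun i => PySem.Int.floordiv n L
        + (if PySem.Int.mod (i * x) L < PySem.Int.mod n L then (1 : Int) else 0)),
      0 ≤ a ∧ a ≤ n := by
  intro a ha
  obtain ⟨i, hi, rfl⟩ := List.mem_map.mp ha
  have hiL : 0 ≤ i ∧ i < L := (PySem.List.mem_pyRange_one).mp hi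
  have hL : 0 < L := by omega
  have hfd : PySem.Int.floordiv n L = n / L := PySem.Int.floordiv_eq_ediv_of_pos hL
  have hdm := Int.mul_ediv_add_emod n L
  have hr0 : 0 ≤ n % L := Int.emod_nonneg n (by omega)
  have hrL : n % L < L := Int.emod_lt_of_pos n hL
  have hq0 : 0 ≤ n / L := Int.ediv_nonneg hn (le_of_lt hL)
  have hqL : n / L ≤ L * (n / L) := le_mul_of_one_le_left hq0 (by omega)
  have hm0 : 0 ≤ PySem.Int.mod (i * x) L := PySem.Int.mod_nonneg _ hL
  rw [hfd]
  constructor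
  · split_ifs <;> omega
  · split_ifs with h
    · have : 0 < PySem.Int.mod n L := by
        have := PySem.Int.mod_nonneg n hL
        omega
      rw [PySem.Int.mod_eq_emod_of_pos hL] at this
      omega
    · omega

-- generic base-case equivalence over an arbitrary weight list
theorem base_generic (n : Int) (w : List Int) (hn : 0 ≤ n) (hw : ∀ a ∈ w, 0 ≤ a ∧ a ≤ n) :
    max (max 0 (F w (0, -n)).1) ((F w (-n, 0)).2)
      = (match (w.foldl ostep ((none : Option Int), (some 0 : Option Int))).2 with
         | none => (w.foldl ostep ((some 0 : Option Int), (none : Option Int))).1.getD 0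
         | some b => max ((w.foldl ostep ((some 0 : Option Int), (none : Option Int))).1.getD 0) b) := by
  have h0 : RelP n (0, -n) ((some 0 : Option Int), (none : Option Int)) := by
    refine ⟨?_, ?_, ?_, ?_⟩ <;> simp <;> omega
  have h1 : RelP n (-n, 0) ((none : Option Int), (some 0 : Option Int)) := by
    refine ⟨?_, ?_, ?_, ?_⟩ <;> simp <;> omega
  have hf0 := RelP_fold n w (0, -n) _ hn hw h0
  have hf1 := RelP_fold n w (-n, 0) _ hn hw h1
  have hsome := fold_fst_some w ((some 0 : Option Int), (none : Option Int)) (by simp)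
  obtain ⟨v, hv⟩ : ∃ v, (w.foldl ostep ((some 0 : Option Int), (none : Option Int))).1 = some v := by
    cases hq : (w.foldl ostep ((some 0 : Option Int), (none : Option Int))).1 with
    | none => exact absurd hq hsome
    | some v => exact ⟨v, rfl⟩
  obtain ⟨hd0, hv0⟩ := hf0.1 v hv
  cases hq2 : (w.foldl ostep ((none : Option Int), (some 0 : Option Int))).2 with
  | none =>
    have hle := hf1.2.2.2 hq2
    simp only [hv, Option.getD_some]
    rw [hd0]
    simp only [max_def]
    split_ifs <;> omega
  | some b =>
    obtain ⟨hd1, hb⟩ := hf1.2.1 b hq2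
    simp only [hv, Option.getD_some]
    rw [hd0, hd1]
    simp only [max_def]
    split_ifs <;> omega

theorem base_case (n x y : Int) (hg : (Int.gcd x y : Int) = 1) (hn : 0 ≤ n) :
    solve n x y = solve_alt n x y := by
  rw [solve.eq_def, solve_alt.eq_def]
  rw [dif_neg (by rw [hg]; simp), dif_neg (by rw [hg]; simp)]
  simp only [List.foldl, if_true]
  rw [foldA_eq_F n (x + y) x, foldA_eq_F n (x + y) x, foldB_eq n (x + y) x, fold_mm]
  have := base_generic n
    ((PySem.List.pyRange 0 (x + y) 1).map (fun i => PySem.Int.floordiv n (x + y)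
      + (if PySem.Int.mod (i * x) (x + y) < PySem.Int.mod n (x + y) then (1 : Int) else 0)))
    hn (w_bounds n (x + y) x hn)
  simpa using this

theorem solve_spec' (n x y : Int) (h : Pre_solve n x y) : solve n x y = solve_alt n x y := by
  obtain ⟨hn, hxy⟩ := h
  by_cases hg1 : (Int.gcd x y : Int) = 1
  · exact base_case n x y hg1 hn
  · have hg0 : (Int.gcd x y : Int) ≠ 0 := by
      intro h0
      exact hxy (Int.gcd_eq_zero_iff.mp (by exact_mod_cast h0))
    have hgpos : 0 < (Int.gcd x y : Int) := by
      have : (0 : Int) ≤ (Int.gcd x y : Int) := Int.natCast_nonneg _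
      omega
    have hfd : ∀ a : Int, PySem.Int.floordiv a (Int.gcd x y : Int) = a / (Int.gcd x y : Int) :=
      fun a => PySem.Int.floordiv_eq_ediv_of_pos hgpos
    have hrec : (Int.gcd (PySem.Int.floordiv x (Int.gcd x y : Int))
        (PySem.Int.floordiv y (Int.gcd x y : Int)) : Int) = 1 := by
      rw [hfd, hfd]
      exact_mod_cast Int.gcd_div_gcd_div_gcd (i := x) (j := y) (by exact_mod_cast hgpos)
    have hq0 : 0 ≤ PySem.Int.floordiv n (Int.gcd x y : Int) := by
      rw [hfd]
      exact Int.ediv_nonneg hn (le_of_lt hgpos)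
    rw [solve.eq_def, solve_alt.eq_def, dif_pos hg1, dif_pos hg1, dif_neg hg0, dif_neg hg0,
        base_case _ _ _ hrec (by omega), base_case _ _ _ hrec hq0]

-- ===== VERDICT (by name: the statement is the Claim_ definition above) =====
theorem solve_spec : Claim_equal_solve := by
  intro n x y _ hpre
  unfold Spec_solve
  exact solve_spec' n x y hpre
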